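-- pv_equiv track=rewrite | github.com/microsoft/RPG-ZeroRepo | zerorepo/rpg_gen/impl_level/func_design/util.py | parse_code_blocks_by_subtree_heading
-- ===== SOURCE A (Python) =====
-- def parse_code_blocks_by_subtree_heading(markdown: str):
--     from collections import defaultdict
--
--     grouped = defaultdict(dict)
--     current_subtree = None
--     raw_code_block_count = 0
--
--     lines = markdown.splitlines()
--     i = 0
--     while i < len(lines):
--         line = lines[i].strip()
--
--         if line.startswith("## "):
--             current_subtree = line[3:].strip()
--             i += 1
--             continue
--
--         if current_subtree and line.startswith("### "):
--             file_path = line[4:].strip()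
--             i += 1
--
--             if i < len(lines) and lines[i].strip() == "```python":
--                 i += 1
--                 code_lines = []
--                 while i < len(lines) and lines[i].strip() != "```":
--                     code_lines.append(lines[i])
--                     i += 1
--                 i += 1  # Skip closing ```
--                 raw_code_block_count += 1
--
--                 code = "\n".join(code_lines).strip()
--                 if file_path in grouped[current_subtree]:
--                     grouped[current_subtree][file_path] += "\n\n" + code
--                 else:
--                     grouped[current_subtree][file_path] = code
--                 continue
--
--         i += 1
--
--     # Convert grouped dict-of-dicts to dict-of-lists
--     result = {
--         subtree: [
--             {"file_path": fp, "code": code}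
--             for fp, code in files.items()
--         ]
--         for subtree, files in grouped.items()
--     }
--
--     return result, raw_code_block_count
-- ===== SOURCE B (Python) =====
-- def _merge(grouped, cur, fp, code):
--     files = grouped.setdefault(cur, {})
--     if fp in files:
--         files[fp] = files[fp] + "\n\n" + code
--     else:
--         files[fp] = code
--
-- def parse_code_blocks_by_subtree_heading(markdown: str):
--     grouped = {}
--     cur = ""
--     cnt = 0
--     mode = "scan"
--     fp = ""
--     acc = []
--     for l in markdown.splitlines():
--         if mode == "code":
--             if l.strip() == "```":
--                 _merge(grouped, cur, fp, "\n".join(acc).strip())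
--                 cnt += 1
--                 mode = "scan"
--             else:
--                 acc.append(l)
--         elif mode == "expect":
--             if l.strip() == "```python":
--                 mode = "code"
--                 acc = []
--             else:
--                 mode = "scan"
--         else:
--             line = l.strip()
--             if line.startswith("## "):
--                 cur = line[3:].strip()
--             elif cur and line.startswith("### "):
--                 fp = line[4:].strip()
--                 mode = "expect"
--     if mode == "code":
--         _merge(grouped, cur, fp, "\n".join(acc).strip())
--         cnt += 1
--     result = {s: [{"file_path": p, "code": c} for p, c in fs.items()]
--               for s, fs in grouped.items()}
--     return result, cnt
-- ===== Notes on version B (the rewrite author's own statement) =====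
-- stated objective: simpler
-- what changed: Replaced A's index-driven while loop with a nested inner collection loop and manual i-bookkeeping by a single flat for-loop over the lines driven by an explicit mode state machine (scan/expect-fence/in-code) with an EOF flush.
import Mathlib
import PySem

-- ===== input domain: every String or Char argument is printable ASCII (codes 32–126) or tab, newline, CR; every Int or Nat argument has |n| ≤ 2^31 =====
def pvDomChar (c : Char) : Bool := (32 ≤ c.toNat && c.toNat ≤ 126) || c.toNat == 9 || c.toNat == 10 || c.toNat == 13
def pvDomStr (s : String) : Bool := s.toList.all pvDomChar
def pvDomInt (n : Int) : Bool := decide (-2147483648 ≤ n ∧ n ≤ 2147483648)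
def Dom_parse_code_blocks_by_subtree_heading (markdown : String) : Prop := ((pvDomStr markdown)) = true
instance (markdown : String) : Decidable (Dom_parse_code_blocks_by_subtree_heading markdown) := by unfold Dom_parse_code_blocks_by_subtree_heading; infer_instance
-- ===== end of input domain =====

-- B replaces A's index/while loop with nested code-collection loop by one flat
-- state-machine pass over the lines (simpler decomposition; same O(n) cost).

-- ===== PORT A =====
-- Final conversion shared by both Pythons verbatim: dict-of-dicts to dict-of-lists.
def pvToResult (grouped : PySem.Dict String (PySem.Dict String String)) :
    List (String × List (List (String × String))) :=
  grouped.items.map (fun kv =>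
    (kv.1, kv.2.items.map (fun fc => [("file_path", fc.1), ("code", fc.2)])))

-- A's inner while: collect raw lines until a stripped "```", also skipping it.
def pvCollect : List String → List String × List String
  | [] => ([], [])
  | l :: rest =>
    if PySem.Str.strip l = "```" then ([], rest)
    else
      let p := pvCollect rest
      (l :: p.1, p.2)

theorem pvCollect_len (ls : List String) : (pvCollect ls).2.length ≤ ls.length := by
  induction ls with
  | nil => simp [pvCollect]
  | cons l rest ih =>
    by_cases h : PySem.Str.strip l = "```"
    · simp [pvCollect, h]
    · simp [pvCollect, h]; omega

-- A's while loop, as structural recursion over the remaining lines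
-- (current_subtree is a String; A's falsy None/"" is the empty string).
def pvLoopA (ls : List String) (grouped : PySem.Dict String (PySem.Dict String String))
    (cur : String) (cnt : Int) : (List (String × List (List (String × String)))) × Int :=
  match ls with
  | [] => (pvToResult grouped, cnt)
  | l :: rest =>
    let line := PySem.Str.strip l
    if PySem.Str.startswith line "## " then
      pvLoopA rest grouped (PySem.Str.strip (PySem.Str.slice line (some 3) none)) cnt
    else if cur != "" && PySem.Str.startswith line "### " then
      let fp := PySem.Str.strip (PySem.Str.slice line (some 4) none)
      match rest with
      | [] => (pvToResult grouped, cnt)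
      | r :: rest2 =>
        if PySem.Str.strip r = "```python" then
          let p := pvCollect rest2
          let code := PySem.Str.strip (PySem.Str.join "\n" p.1)
          let files := (grouped.get? cur).getD PySem.Dict.empty
          let files' :=
            if files.contains fp then
              files.insert fp ((files.getD fp "") ++ "\n\n" ++ code)
            else files.insert fp code
          pvLoopA p.2 (grouped.insert cur files') cur (cnt + 1)
        else pvLoopA rest2 grouped cur cnt
    else pvLoopA rest grouped cur cnt
termination_by ls.length
decreasing_by
  all_goals simp
  all_goals (have := pvCollect_len rest2; omega)

def parse_code_blocks_by_subtree_heading (markdown : String) :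
    (List (String × List (List (String × String)))) × Int :=
  pvLoopA (PySem.Str.splitlines markdown) PySem.Dict.empty "" 0

-- ===== PORT B =====
inductive PvMode where
  | scan : PvMode
  | expect : String → PvMode
  | code : String → List String → PvMode
deriving Repr, DecidableEq

structure PvSt where
  grouped : PySem.Dict String (PySem.Dict String String)
  cur : String
  cnt : Int
  mode : PvMode

def pvMerge (grouped : PySem.Dict String (PySem.Dict String String))
    (cur fp code : String) : PySem.Dict String (PySem.Dict String String) :=
  let files := (grouped.get? cur).getD PySem.Dict.empty
  grouped.insert cur
    (if files.contains fp then
       files.insert fp ((files.getD fp "") ++ "\n\n" ++ code)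
     else files.insert fp code)

def pvStep (st : PvSt) (l : String) : PvSt :=
  match st.mode with
  | .code fp acc =>
    if PySem.Str.strip l = "```" then
      { st with grouped := pvMerge st.grouped st.cur fp
                  (PySem.Str.strip (PySem.Str.join "\n" acc)),
                cnt := st.cnt + 1, mode := .scan }
    else { st with mode := .code fp (acc ++ [l]) }
  | .expect fp =>
    if PySem.Str.strip l = "```python" then { st with mode := .code fp [] }
    else { st with mode := .scan }
  | .scan =>
    let line := PySem.Str.strip l
    if PySem.Str.startswith line "## " then
      { st with cur := PySem.Str.strip (PySem.Str.slice line (some 3) none) }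
    else if st.cur != "" && PySem.Str.startswith line "### " then
      { st with mode := .expect (PySem.Str.strip (PySem.Str.slice line (some 4) none)) }
    else st

def pvFinalize (st : PvSt) : (List (String × List (List (String × String)))) × Int :=
  match st.mode with
  | .code fp acc =>
    (pvToResult (pvMerge st.grouped st.cur fp
       (PySem.Str.strip (PySem.Str.join "\n" acc))), st.cnt + 1)
  | _ => (pvToResult st.grouped, st.cnt)

def parse_code_blocks_by_subtree_heading_alt (markdown : String) :
    (List (String × List (List (String × String)))) × Int :=
  pvFinalize ((PySem.Str.splitlines markdown).foldl pvStep
    ⟨PySem.Dict.empty, "", 0, .scan⟩)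

-- ===== PRECONDITION & SPEC =====
def Spec_parse_code_blocks_by_subtree_heading (markdown : String) (out : (List (String × List (List (String × String)))) × Int) : Prop := out = parse_code_blocks_by_subtree_heading_alt markdown
instance (markdown : String) (out : (List (String × List (List (String × String)))) × Int) : Decidable (Spec_parse_code_blocks_by_subtree_heading markdown out) := by unfold Spec_parse_code_blocks_by_subtree_heading; infer_instance

-- ===== CLAIM (what is proved, stated in full; the proofs are below) =====
def Claim_equal_parse_code_blocks_by_subtree_heading : Prop := ∀ (markdown : String), Dom_parse_code_blocks_by_subtree_heading markdown → Spec_parse_code_blocks_by_subtree_heading markdown (parse_code_blocks_by_subtree_heading markdown)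

-- ===== LEMMAS AND PROOFS =====

-- Running B from in-code state over ls equals merging the collected block and
-- continuing from scan state on what A's inner loop leaves behind.
theorem pvCode_run (ls : List String) :
    ∀ (g : PySem.Dict String (PySem.Dict String String)) (cur : String) (cnt : Int)
      (fp : String) (acc : List String),
    pvFinalize (ls.foldl pvStep ⟨g, cur, cnt, .code fp acc⟩)
      = pvFinalize ((pvCollect ls).2.foldl pvStep
          ⟨pvMerge g cur fp
             (PySem.Str.strip (PySem.Str.join "\n" (acc ++ (pvCollect ls).1))),
           cur, cnt + 1, .scan⟩) := by
  induction ls with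
  | nil => intro g cur cnt fp acc; simp [pvCollect, pvFinalize, List.foldl]
  | cons l rest ih =>
    intro g cur cnt fp acc
    by_cases h : PySem.Str.strip l = "```"
    · simp [pvCollect, h, List.foldl, pvStep]
    · simp only [pvCollect, h, if_false, List.foldl, pvStep]
      rw [ih g cur cnt fp (acc ++ [l])]
      simp [List.append_assoc]

theorem pvMain (n : Nat) : ∀ (ls : List String), ls.length ≤ n →
    ∀ (g : PySem.Dict String (PySem.Dict String String)) (cur : String) (cnt : Int),
    pvFinalize (ls.foldl pvStep ⟨g, cur, cnt, .scan⟩) = pvLoopA ls g cur cnt := by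
  induction n with
  | zero =>
    intro ls hls g cur cnt
    cases ls with
    | nil => simp [pvLoopA, pvFinalize]
    | cons l rest => simp at hls
  | succ n ih =>
    intro ls hls g cur cnt
    cases ls with
    | nil => simp [pvLoopA, pvFinalize]
    | cons l rest =>
      simp only [List.length_cons] at hls
      by_cases h2 : PySem.Str.startswith (PySem.Str.strip l) "## " = true
      all_goals try simp at h2
      · have e1 : (l :: rest).foldl pvStep ⟨g, cur, cnt, .scan⟩
            = rest.foldl pvStep ⟨g, PySem.Str.strip (PySem.Str.slice (PySem.Str.strip l) (some 3) none), cnt, .scan⟩ := by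
          simp [List.foldl_cons, pvStep, h2]
        rw [e1, ih rest (by omega)]
        simp [pvLoopA, h2]
      · by_cases h3 : (cur != "" && PySem.Str.startswith (PySem.Str.strip l) "### ") = true
        all_goals try simp at h3
        · have e1 : (l :: rest).foldl pvStep ⟨g, cur, cnt, .scan⟩
              = rest.foldl pvStep ⟨g, cur, cnt, .expect (PySem.Str.strip (PySem.Str.slice (PySem.Str.strip l) (some 4) none))⟩ := by
            simp [List.foldl_cons, pvStep, h2, h3]
          rw [e1]
          cases rest with
          | nil => simp [pvLoopA, h2, h3, pvFinalize]
          | cons r rest2 =>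
            simp only [List.length_cons] at hls
            by_cases h4 : PySem.Str.strip r = "```python"
            all_goals try simp at h4
            · have e2 : (r :: rest2).foldl pvStep ⟨g, cur, cnt, .expect (PySem.Str.strip (PySem.Str.slice (PySem.Str.strip l) (some 4) none))⟩
                  = rest2.foldl pvStep ⟨g, cur, cnt, .code (PySem.Str.strip (PySem.Str.slice (PySem.Str.strip l) (some 4) none)) []⟩ := by
                simp [List.foldl_cons, pvStep, h4]
              rw [e2, pvCode_run, ih _ (by have := pvCollect_len rest2; omega)]
              simp [pvLoopA, h2, h3, h4, pvMerge]
            · have e2 : (r :: rest2).foldl pvStep ⟨g, cur, cnt, .expect (PySem.Str.strip (PySem.Str.slice (PySem.Str.strip l) (some 4) none))⟩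
                  = rest2.foldl pvStep ⟨g, cur, cnt, .scan⟩ := by
                simp [List.foldl_cons, pvStep, h4]
              rw [e2, ih rest2 (by omega)]
              simp [pvLoopA, h2, h3, h4]
        · by_cases hc : cur = ""
          · have e1 : (l :: rest).foldl pvStep ⟨g, cur, cnt, .scan⟩
                = rest.foldl pvStep ⟨g, cur, cnt, .scan⟩ := by
              simp [List.foldl_cons, pvStep, h2, hc]
            rw [e1, ih rest (by omega)]
            simp [pvLoopA, h2, hc]
          · have e1 : (l :: rest).foldl pvStep ⟨g, cur, cnt, .scan⟩
                = rest.foldl pvStep ⟨g, cur, cnt, .scan⟩ := by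
              simp [List.foldl_cons, pvStep, h2, h3 hc]
            rw [e1, ih rest (by omega)]
            simp [pvLoopA, h2, h3 hc]

-- ===== VERDICT (by name: the statement is the Claim_ definition above) =====
theorem parse_code_blocks_by_subtree_heading_spec : Claim_equal_parse_code_blocks_by_subtree_heading := by
  intro markdown _
  unfold Spec_parse_code_blocks_by_subtree_heading
  unfold parse_code_blocks_by_subtree_heading parse_code_blocks_by_subtree_heading_alt
  rw [pvMain (PySem.Str.splitlines markdown).length _ le_rfl]
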